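-- pv_equiv track=rewrite | github.com/Raj-9747/erp-gst | app.py | _pick_amount_col_portal
-- ===== SOURCE A (Python) =====
-- from typing import List, Optional, Tuple
--
-- def _pick_amount_col_portal(cols: List[str]) -> str:
--     pref = [c for c in cols if "taxable value" in c.lower()] \
--         or [c for c in cols if "taxable" in c.lower()] \
--         or [c for c in cols if "invoice value" in c.lower()] \
--         or [c for c in cols if "total value" in c.lower()]
--     if pref:
--         return pref[0]
--     raise ValueError("Portal amount column not found.")
-- ===== SOURCE B (Python) =====
-- def _pick_amount_col_portal(cols):
--     def _rank(c):
--         lc = c.lower()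
--         if "taxable value" in lc:
--             return 0
--         if "taxable" in lc:
--             return 1
--         if "invoice value" in lc:
--             return 2
--         if "total value" in lc:
--             return 3
--         return 4
--
--     best, best_rank = None, 4
--     for c in cols:
--         r = _rank(c)
--         if r < best_rank:
--             best, best_rank = c, r
--     if best is None:
--         raise ValueError("Portal amount column not found.")
--     return best
-- ===== Notes on version B (the rewrite author's own statement) =====
-- stated objective: alternative
-- what changed: Instead of A's four staged full-list filtering passes (one per keyword), B makes a single pass over the columns, assigning each column a priority rank (0-3, 4 = no match) and tracking the argmin column with a strict-less accumulator, which keeps the first column of the highest-priority tier.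
import Mathlib
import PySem

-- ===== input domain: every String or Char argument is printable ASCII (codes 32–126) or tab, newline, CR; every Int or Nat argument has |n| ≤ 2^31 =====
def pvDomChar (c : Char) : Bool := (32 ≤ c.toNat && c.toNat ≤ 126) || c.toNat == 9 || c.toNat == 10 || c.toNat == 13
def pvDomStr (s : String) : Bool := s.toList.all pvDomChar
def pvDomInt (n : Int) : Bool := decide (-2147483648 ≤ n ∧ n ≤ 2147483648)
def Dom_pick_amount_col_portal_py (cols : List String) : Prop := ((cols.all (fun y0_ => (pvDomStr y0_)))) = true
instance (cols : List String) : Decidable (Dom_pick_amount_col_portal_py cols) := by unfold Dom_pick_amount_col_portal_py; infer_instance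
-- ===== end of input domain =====

-- B replaces A's four staged keyword filter passes by a single pass over the columns that
-- ranks each column (0-3 by keyword priority) and keeps the first argmin column (alternative).


-- ===== PORT A =====
-- "kw in c.lower()"
def pvHasKw (kw : String) (c : String) : Bool :=
  PySem.Str.isIn kw (PySem.Str.lower c)

-- A: pref = [c for c in cols if "taxable value" in c.lower()] or … ; return pref[0] (raise if
-- empty, excluded by Pre_; the Lean port returns "" there, outside the claim).
def pick_amount_col_portal_py (cols : List String) : String :=
  let p1 := cols.filter (fun c => pvHasKw "taxable value" c)
  let p2 := if p1.isEmpty then cols.filter (fun c => pvHasKw "taxable" c) else p1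
  let p3 := if p2.isEmpty then cols.filter (fun c => pvHasKw "invoice value" c) else p2
  let pref := if p3.isEmpty then cols.filter (fun c => pvHasKw "total value" c) else p3
  pref.headD ""

-- ===== PORT B =====
-- B: rank each column by the first keyword its lowercase form contains (4 = none).
def pvRank (c : String) : Nat :=
  if pvHasKw "taxable value" c then 0
  else if pvHasKw "taxable" c then 1
  else if pvHasKw "invoice value" c then 2
  else if pvHasKw "total value" c then 3
  else 4

-- B's loop body: keep the first column achieving the minimal rank (strict <).
def pvStep (s : Option String × Nat) (c : String) : Option String × Nat :=
  let r := pvRank c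
  if r < s.2 then (some c, r) else s

-- B raises where the accumulator stays None (excluded by Pre_; the port returns "" there).
def pick_amount_col_portal_py_alt (cols : List String) : String :=
  (cols.foldl pvStep (none, 4)).1.getD ""

-- ===== PRECONDITION & SPEC =====
-- Pre_ excludes exactly the inputs where A raises ValueError("Portal amount column not found."):
-- no column's lowercase form contains any keyword ("taxable value" is subsumed by "taxable").
def Pre_pick_amount_col_portal_py (cols : List String) : Prop :=
  (cols.any (fun c => pvHasKw "taxable" c || pvHasKw "invoice value" c || pvHasKw "total value" c)) = true
instance (cols : List String) : Decidable (Pre_pick_amount_col_portal_py cols) := by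
  unfold Pre_pick_amount_col_portal_py; infer_instance

def pvWitness_pick_amount_col_portal_py : List String := ["Qty", "Taxable Value"]

def Spec_pick_amount_col_portal_py (cols : List String) (out : String) : Prop := out = pick_amount_col_portal_py_alt cols
instance (cols : List String) (out : String) : Decidable (Spec_pick_amount_col_portal_py cols out) := by unfold Spec_pick_amount_col_portal_py; infer_instance

-- ===== CLAIM (what is proved, stated in full; the proofs are below) =====
def Claim_equal_pick_amount_col_portal_py : Prop := ∀ (cols : List String), Dom_pick_amount_col_portal_py cols → Pre_pick_amount_col_portal_py cols → Spec_pick_amount_col_portal_py cols (pick_amount_col_portal_py cols)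

-- ===== LEMMAS AND PROOFS =====

theorem pv_filter_empty (p : String → Bool) (cols : List String)
    (h : cols.find? p = none) : (cols.filter p).isEmpty = true := by
  have := List.head?_filter (p := p) (l := cols)
  rw [List.isEmpty_iff, ← List.head?_eq_none_iff, this, h]

theorem pv_filter_head (p : String → Bool) (cols : List String) (c : String)
    (h : cols.find? p = some c) :
    (cols.filter p).isEmpty = false ∧ (cols.filter p).headD "" = c := by
  have h' : (cols.filter p).head? = some c := by
    rw [List.head?_filter (p := p) (l := cols), h]
  constructor
  · rw [List.isEmpty_eq_false_iff]; intro hnil; rw [hnil] at h'; simp at h'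
  · rw [List.headD_eq_head?_getD, h']; rfl

theorem pv_find_congr (p q : String → Bool) (l : List String)
    (h : ∀ x ∈ l, p x = q x) : l.find? p = l.find? q := by
  induction l with
  | nil => rfl
  | cons a t ih =>
    have ha := h a (by simp)
    simp only [List.find?_cons, ha]
    cases hq : q a with
    | true => rfl
    | false => exact ih (fun x hx => h x (by simp [hx]))

-- rank characterisations
theorem pv_rank0 (c : String) : (pvRank c == 0) = pvHasKw "taxable value" c := by
  unfold pvRank; split_ifs <;> simp_all [pvHasKw]

theorem pv_rank1 (c : String) (h0 : pvHasKw "taxable value" c = false) :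
    (pvRank c == 1) = pvHasKw "taxable" c := by
  unfold pvRank; split_ifs <;> simp_all [pvHasKw]

theorem pv_rank2 (c : String) (h0 : pvHasKw "taxable value" c = false)
    (h1 : pvHasKw "taxable" c = false) :
    (pvRank c == 2) = pvHasKw "invoice value" c := by
  unfold pvRank; split_ifs <;> simp_all [pvHasKw]

theorem pv_rank3 (c : String) (h0 : pvHasKw "taxable value" c = false)
    (h1 : pvHasKw "taxable" c = false) (h2 : pvHasKw "invoice value" c = false) :
    (pvRank c == 3) = pvHasKw "total value" c := by
  unfold pvRank; split_ifs <;> simp_all [pvHasKw]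

theorem pv_rank_ge1 (c : String) (h0 : pvHasKw "taxable value" c = false) : 1 ≤ pvRank c := by
  unfold pvRank; split_ifs <;> simp_all [pvHasKw]

theorem pv_rank_ge2 (c : String) (h0 : pvHasKw "taxable value" c = false)
    (h1 : pvHasKw "taxable" c = false) : 2 ≤ pvRank c := by
  unfold pvRank; split_ifs <;> simp_all [pvHasKw]

theorem pv_rank_ge3 (c : String) (h0 : pvHasKw "taxable value" c = false)
    (h1 : pvHasKw "taxable" c = false) (h2 : pvHasKw "invoice value" c = false) :
    3 ≤ pvRank c := by
  unfold pvRank; split_ifs <;> simp_all [pvHasKw]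

-- fold does nothing when every remaining rank is ≥ the current one
theorem pv_fold_stable (cols : List String) (b : Option String) (r : Nat)
    (h : ∀ c ∈ cols, r ≤ pvRank c) : cols.foldl pvStep (b, r) = (b, r) := by
  induction cols with
  | nil => rfl
  | cons a t ih =>
    have ha := h a (by simp)
    simp only [List.foldl_cons, pvStep]
    rw [if_neg (by omega)]
    exact ih (fun c hc => h c (by simp [hc]))

-- if m < r, every rank in cols is ≥ m and c is the first column of rank m,
-- then B's fold ends at (some c, m)
theorem pv_fold_min (cols : List String) (b : Option String) (r m : Nat) (c : String)
    (hm : m < r) (hall : ∀ c' ∈ cols, m ≤ pvRank c')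
    (hf : cols.find? (fun x => pvRank x == m) = some c) :
    cols.foldl pvStep (b, r) = (some c, m) := by
  induction cols generalizing b r with
  | nil => simp at hf
  | cons a t ih =>
    by_cases hp : pvRank a = m
    · have hpa : (pvRank a == m) = true := by simp [hp]
      rw [List.find?_cons, hpa] at hf
      have hc : a = c := by simpa using hf
      subst hc
      simp only [List.foldl_cons, pvStep]
      rw [if_pos (by omega : pvRank a < (b, r).2)]
      rw [hp]
      exact pv_fold_stable t (some a) m (fun c' hc' => hall c' (by simp [hc']))
    · have hpa : (pvRank a == m) = false := by simp [hp]
      have hf' : t.find? (fun x => pvRank x == m) = some c := by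
        rw [List.find?_cons, hpa] at hf; exact hf
      have hma : m < pvRank a :=
        lt_of_le_of_ne (hall a (by simp)) (fun h => hp h.symm)
      have hall' : ∀ c' ∈ t, m ≤ pvRank c' := fun c' hc' => hall c' (by simp [hc'])
      simp only [List.foldl_cons, pvStep]
      by_cases hlt : pvRank a < r
      · rw [if_pos hlt]; exact ih (some a) (pvRank a) hma hall' hf'
      · rw [if_neg hlt]; exact ih b r hm hall' hf'

-- ===== VERDICT (by name: the statement is the Claim_ definition above) =====
theorem pick_amount_col_portal_py_spec : Claim_equal_pick_amount_col_portal_py := by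
  intro cols _ hpre
  unfold Spec_pick_amount_col_portal_py pick_amount_col_portal_py pick_amount_col_portal_py_alt
  cases h1 : cols.find? (fun c => pvHasKw "taxable value" c) with
  | some c =>
    obtain ⟨he, hh⟩ := pv_filter_head _ _ _ h1
    have hf : cols.find? (fun x => pvRank x == 0) = some c := by
      rw [pv_find_congr _ _ _ (fun x _ => pv_rank0 x)]; exact h1
    rw [pv_fold_min cols none 4 0 c (by omega) (fun _ _ => Nat.zero_le _) hf]
    simp [he, h1]
  | none =>
    have n1 : ∀ x ∈ cols, pvHasKw "taxable value" x = false := by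
      intro x hx; simpa using List.find?_eq_none.mp h1 x hx
    cases h2 : cols.find? (fun c => pvHasKw "taxable" c) with
    | some c =>
      obtain ⟨he, hh⟩ := pv_filter_head _ _ _ h2
      have hf : cols.find? (fun x => pvRank x == 1) = some c := by
        rw [pv_find_congr _ _ _ (fun x hx => pv_rank1 x (n1 x hx))]; exact h2
      rw [pv_fold_min cols none 4 1 c (by omega) (fun x hx => pv_rank_ge1 x (n1 x hx)) hf]
      simp [pv_filter_empty _ _ h1, he, h2]
    | none =>
      have n2 : ∀ x ∈ cols, pvHasKw "taxable" x = false := by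
        intro x hx; simpa using List.find?_eq_none.mp h2 x hx
      cases h3 : cols.find? (fun c => pvHasKw "invoice value" c) with
      | some c =>
        obtain ⟨he, hh⟩ := pv_filter_head _ _ _ h3
        have hf : cols.find? (fun x => pvRank x == 2) = some c := by
          rw [pv_find_congr _ _ _ (fun x hx => pv_rank2 x (n1 x hx) (n2 x hx))]; exact h3
        rw [pv_fold_min cols none 4 2 c (by omega)
              (fun x hx => pv_rank_ge2 x (n1 x hx) (n2 x hx)) hf]
        simp [pv_filter_empty _ _ h1, pv_filter_empty _ _ h2, he, h3]
      | none =>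
        have n3 : ∀ x ∈ cols, pvHasKw "invoice value" x = false := by
          intro x hx; simpa using List.find?_eq_none.mp h3 x hx
        cases h4 : cols.find? (fun c => pvHasKw "total value" c) with
        | some c =>
          obtain ⟨he, hh⟩ := pv_filter_head _ _ _ h4
          have hf : cols.find? (fun x => pvRank x == 3) = some c := by
            rw [pv_find_congr _ _ _ (fun x hx => pv_rank3 x (n1 x hx) (n2 x hx) (n3 x hx))]
            exact h4
          rw [pv_fold_min cols none 4 3 c (by omega)
                (fun x hx => pv_rank_ge3 x (n1 x hx) (n2 x hx) (n3 x hx)) hf]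
          simp [pv_filter_empty _ _ h1, pv_filter_empty _ _ h2, pv_filter_empty _ _ h3, h4]
        | none =>
          exfalso
          unfold Pre_pick_amount_col_portal_py at hpre
          rw [List.any_eq_true] at hpre
          obtain ⟨c, hc, hp⟩ := hpre
          simp only [Bool.or_eq_true] at hp
          rcases hp with (h | h) | h
          · exact absurd (n2 c hc) (by simp [h])
          · exact absurd (n3 c hc) (by simp [h])
          · exact absurd (List.find?_eq_none.mp h4 c hc) (by simp [h])
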